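-- pv_equiv track=rewrite | github.com/jinukim-ml/coding-test-prep | Programmers/Exhaustive search/42840.py | solution
-- ===== SOURCE A (Python) =====
-- def solution(answers):
--     first = [1,2,3,4,5]
--     second = [2,1,2,3,2,4,2,5]
--     third = [3,3,1,1,2,2,4,4,5,5]
--
--     cnt = [0, 0, 0]
--     for i in range(len(answers)):
--         if answers[i] == first[i%len(first)]:
--             cnt[0] += 1
--         if answers[i] == second[i%len(second)]:
--             cnt[1] += 1
--         if answers[i] == third[i%len(third)]:
--             cnt[2] += 1
--
--     maximum = max(cnt)
--     answer = []
--     for i in range(3):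
--         if cnt[i] == maximum:
--             answer.append(i+1)
--     return answer
-- ===== SOURCE B (Python) =====
-- def solution(answers):
--     patterns = [[1, 2, 3, 4, 5],
--                 [2, 1, 2, 3, 2, 4, 2, 5],
--                 [3, 3, 1, 1, 2, 2, 4, 4, 5, 5]]
--     # One pass: histogram of (position mod 40, value); 40 = lcm(5, 8, 10),
--     # so a position's residue mod 40 determines each pattern's guess there.
--     hist = {}
--     for i, a in enumerate(answers):
--         key = (i % 40, a)
--         hist[key] = hist.get(key, 0) + 1
--     # Scores come from the histogram alone: 40 lookups per pattern.
--     scores = []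
--     for p in patterns:
--         L = len(p)
--         s = 0
--         for r in range(40):
--             s += hist.get((r, p[r % L]), 0)
--         scores.append(s)
--     best = max(scores)
--     return [k + 1 for k in range(3) if scores[k] == best]
-- ===== Notes on version B (the rewrite author's own statement) =====
-- stated objective: alternative
-- what changed: Replaces A's single interleaved pass that compares each answer against three cyclic patterns by a histogram keyed by (index mod 40, value) built in one pass (40 = lcm of the pattern periods); each pattern's score is then read off the histogram with 40 lookups, never rescanning the answers.
import Mathlib
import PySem

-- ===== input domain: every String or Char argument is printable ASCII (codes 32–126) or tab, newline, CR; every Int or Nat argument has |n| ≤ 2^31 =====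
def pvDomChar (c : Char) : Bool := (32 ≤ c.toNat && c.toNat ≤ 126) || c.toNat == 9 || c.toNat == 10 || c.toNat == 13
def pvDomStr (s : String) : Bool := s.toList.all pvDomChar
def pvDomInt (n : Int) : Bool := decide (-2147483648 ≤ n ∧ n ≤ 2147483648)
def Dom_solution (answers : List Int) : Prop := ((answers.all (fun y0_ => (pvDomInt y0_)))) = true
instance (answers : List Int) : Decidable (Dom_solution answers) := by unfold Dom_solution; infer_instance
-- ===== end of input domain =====

-- ===== PORT A =====
-- One honest line: B replaces A's interleaved answer-vs-three-patterns pass by a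
-- histogram keyed by (index mod 40, value), from which the three scores are read off.
def solution (answers : List Int) : List Int :=
  let first : List Int := [1, 2, 3, 4, 5]
  let second : List Int := [2, 1, 2, 3, 2, 4, 2, 5]
  let third : List Int := [3, 3, 1, 1, 2, 2, 4, 4, 5, 5]
  let cnt := (PySem.List.pyRange 0 (answers.length : Int) 1).foldl
    (fun (c : Int × Int × Int) i =>
      ((if PySem.List.pyGetD answers i 0 = PySem.List.pyGetD first (PySem.Int.mod i (first.length : Int)) 0 then c.1 + 1 else c.1),
       (if PySem.List.pyGetD answers i 0 = PySem.List.pyGetD second (PySem.Int.mod i (second.length : Int)) 0 then c.2.1 + 1 else c.2.1),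
       (if PySem.List.pyGetD answers i 0 = PySem.List.pyGetD third (PySem.Int.mod i (third.length : Int)) 0 then c.2.2 + 1 else c.2.2)))
    (0, 0, 0)
  let cntL : List Int := [cnt.1, cnt.2.1, cnt.2.2]
  let maximum := (PySem.List.max? cntL (fun x => x)).getD 0
  (PySem.List.pyRange 0 3 1).foldl
    (fun acc i => if PySem.List.pyGetD cntL i 0 = maximum then acc ++ [i + 1] else acc) []

-- ===== PORT B =====
-- hist[key] = hist.get(key, 0) + 1, key = (i % 40, a)
def pvHist (answers : List Int) : PySem.Dict (Int × Int) Int :=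
  (PySem.List.enumerate answers 0).foldl
    (fun d ia => d.insert (PySem.Int.mod ia.1 40, ia.2) (d.getD (PySem.Int.mod ia.1 40, ia.2) 0 + 1))
    PySem.Dict.empty

-- s += hist.get((r, p[r % L]), 0) for r in range(40)
def pvPatScore (hist : PySem.Dict (Int × Int) Int) (p : List Int) : Int :=
  (PySem.List.pyRange 0 40 1).foldl
    (fun s r => s + hist.getD (r, PySem.List.pyGetD p (PySem.Int.mod r (p.length : Int)) 0) 0) 0

def solution_alt (answers : List Int) : List Int :=
  let patterns : List (List Int) :=
    [[1, 2, 3, 4, 5], [2, 1, 2, 3, 2, 4, 2, 5], [3, 3, 1, 1, 2, 2, 4, 4, 5, 5]]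
  let hist := pvHist answers
  let scores : List Int := patterns.map (fun p => pvPatScore hist p)
  let best := (PySem.List.max? scores (fun x => x)).getD 0
  (PySem.List.pyRange 0 3 1).foldl
    (fun acc k => if PySem.List.pyGetD scores k 0 = best then acc ++ [k + 1] else acc) []

-- ===== PRECONDITION & SPEC =====
def Spec_solution (answers : List Int) (out : List Int) : Prop := out = solution_alt answers
instance (answers : List Int) (out : List Int) : Decidable (Spec_solution answers out) := by unfold Spec_solution; infer_instance

-- ===== CLAIM (what is proved, stated in full; the proofs are below) =====
def Claim_equal_solution : Prop := ∀ (answers : List Int), Dom_solution answers → Spec_solution answers (solution answers)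

-- ===== LEMMAS AND PROOFS =====

-- A's interleaved triple-counter fold splits into three independent counting folds.
theorem foldl_triple_split (p q r : Int → Prop) [DecidablePred p] [DecidablePred q] [DecidablePred r]
    (l : List Int) (a b c : Int) :
    l.foldl (fun (s : Int × Int × Int) i =>
        ((if p i then s.1 + 1 else s.1),
         (if q i then s.2.1 + 1 else s.2.1),
         (if r i then s.2.2 + 1 else s.2.2))) (a, b, c)
    = (l.foldl (fun s i => if p i then s + 1 else s) a,
       l.foldl (fun s i => if q i then s + 1 else s) b,
       l.foldl (fun s i => if r i then s + 1 else s) c) := by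
  induction l generalizing a b c with
  | nil => rfl
  | cons i l ih => simp only [List.foldl_cons]; exact ih _ _ _

-- When a ∉ rs, the indicator sum over rs vanishes.
theorem pvIndicator_not_mem {α : Type} (q : Int → α → Bool) (x : α) (a : Int)
    (rs : List Int) (h : a ∉ rs) :
    (rs.map (fun r => if a = r ∧ q r x = true then (1 : Int) else 0)).sum = 0 := by
  induction rs with
  | nil => rfl
  | cons r rs ih =>
    simp only [List.mem_cons, not_or] at h
    simp [List.map_cons, List.sum_cons, h.1, ih h.2]

-- The indicator sum over a Nodup list containing a picks out exactly the a-term.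
theorem pvIndicator_sum {α : Type} (q : Int → α → Bool) (x : α) (a : Int)
    (rs : List Int) (hnd : rs.Nodup) (ha : a ∈ rs) :
    (rs.map (fun r => if a = r ∧ q r x = true then (1 : Int) else 0)).sum
      = if q a x then (1 : Int) else 0 := by
  induction rs with
  | nil => cases ha
  | cons r rs ih =>
    rcases List.nodup_cons.mp hnd with ⟨hr, hnd'⟩
    simp only [List.map_cons, List.sum_cons]
    rcases List.mem_cons.mp ha with h | h
    · subst h
      rw [pvIndicator_not_mem q x a rs hr]
      by_cases hq : q a x <;> simp [hq]
    · have hne : a ≠ r := by rintro rfl; exact hr h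
      simp [hne, ih hnd' h]

-- Partitioning a countP over a classifier g whose values lie in the Nodup list rs.
theorem pvPartition {α : Type} (g : α → Int) (q : Int → α → Bool) (rs : List Int)
    (hnd : rs.Nodup) (l : List α) (hg : ∀ x ∈ l, g x ∈ rs) :
    (rs.map (fun r => (l.countP (fun x => decide (g x = r) && q r x) : Int))).sum
      = (l.countP (fun x => q (g x) x) : Int) := by
  induction l with
  | nil => simp
  | cons x l ih =>
    have hx : g x ∈ rs := hg x (List.mem_cons_self ..)
    have hl : ∀ y ∈ l, g y ∈ rs := fun y hy => hg y (List.mem_cons_of_mem _ hy)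
    simp only [List.countP_cons]
    have hsplit :
        (rs.map (fun r => ((l.countP (fun y => decide (g y = r) && q r y)
            + if (fun y => decide (g y = r) && q r y) x then 1 else 0 : Nat) : Int))).sum
        = (rs.map (fun r => (l.countP (fun y => decide (g y = r) && q r y) : Int))).sum
          + (rs.map (fun r => if g x = r ∧ q r x = true then (1 : Int) else 0)).sum := by
      rw [← List.sum_map_add]
      refine congrArg List.sum (List.map_congr_left fun r _ => ?_)
      push_cast
      by_cases h1 : g x = r <;> by_cases h2 : q r x <;> simp [h1, h2]
    rw [hsplit, ih hl, pvIndicator_sum q x (g x) rs hnd hx]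
    by_cases hq : q (g x) x <;> push_cast [hq] <;> ring

-- (i mod 40) mod L = i mod L when L divides 40 (L = 5, 8, 10).
theorem pvModMod (i L : Int) (hL : 0 < L) (hdvd : L ∣ 40) :
    PySem.Int.mod (PySem.Int.mod i 40) L = PySem.Int.mod i L := by
  simp only [PySem.Int.mod_eq_emod_of_pos hL,
    PySem.Int.mod_eq_emod_of_pos (show (0:Int) < 40 by norm_num)]
  exact Int.emod_emod_of_dvd i hdvd

-- Every residue mod 40 of an index of enumerate lies in range(40).
theorem pvResidue_mem (answers : List Int) (ia : Int × Int)
    (_h : ia ∈ PySem.List.enumerate answers 0) :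
    PySem.Int.mod ia.1 40 ∈ PySem.List.pyRange 0 40 1 := by
  rw [PySem.List.mem_pyRange_one]
  exact ⟨PySem.Int.mod_nonneg _ (by norm_num), PySem.Int.mod_lt _ (by norm_num)⟩

-- Core fact: for a pattern whose length divides 40, B's histogram score equals
-- A's direct counting fold.
theorem pvScore_eq (answers : List Int) (p : List Int) (hL : 0 < (p.length : Int))
    (hdvd : (p.length : Int) ∣ 40) :
    pvPatScore (pvHist answers) p
    = (PySem.List.pyRange 0 (answers.length : Int) 1).foldl
        (fun s i => if PySem.List.pyGetD answers i 0
            = PySem.List.pyGetD p (PySem.Int.mod i (p.length : Int)) 0 then s + 1 else s) 0 := by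
  -- B's histogram is the counter of the residue/value keys.
  have hhist : pvHist answers
      = PySem.Dict.counter ((PySem.List.enumerate answers 0).map
          (fun ia => (PySem.Int.mod ia.1 40, ia.2))) := by
    unfold pvHist
    rw [← PySem.Dict.foldl_insert_getD_add_one_eq_counter, List.foldl_map]
  unfold pvPatScore
  rw [hhist]
  -- A's fold over indices is the same fold over enumerate.
  have hA :
      (PySem.List.pyRange 0 (answers.length : Int) 1).foldl
          (fun s i => if PySem.List.pyGetD answers i 0
              = PySem.List.pyGetD p (PySem.Int.mod i (p.length : Int)) 0 then s + 1 else s) (0 : Int)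
      = (PySem.List.enumerate answers 0).foldl
          (fun s ia => if ia.2
              = PySem.List.pyGetD p (PySem.Int.mod ia.1 (p.length : Int)) 0 then s + 1 else s) (0 : Int) := by
    rw [PySem.List.enumerate_eq_map_pyRange (d := 0), List.foldl_map]
    rfl
  refine Eq.trans ?_ hA.symm
  rw [PySem.List.foldl_ite_add_one]
  -- B's sum of lookups becomes a sum of counts.
  rw [PySem.List.foldl_add]
  simp only [PySem.Dict.getD_counter, List.count_eq_countP, List.countP_map]
  rw [zero_add, zero_add]
  -- Partition the count by residue class.
  have := pvPartition (fun ia : Int × Int => PySem.Int.mod ia.1 40)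
      (fun r ia => decide (ia.2 = PySem.List.pyGetD p (PySem.Int.mod r (p.length : Int)) 0))
      (PySem.List.pyRange 0 40 1) (PySem.List.nodup_pyRange_one 0 40)
      (PySem.List.enumerate answers 0) (pvResidue_mem answers)
  rw [show (fun ia : Int × Int => decide
        (ia.2 = PySem.List.pyGetD p (PySem.Int.mod (PySem.Int.mod ia.1 40) (p.length : Int)) 0))
      = (fun ia : Int × Int => decide
        (ia.2 = PySem.List.pyGetD p (PySem.Int.mod ia.1 (p.length : Int)) 0)) from
    funext fun ia => by rw [pvModMod ia.1 _ hL hdvd]] at this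
  rw [← this]
  refine congrArg List.sum (List.map_congr_left fun r _ => ?_)
  refine congrArg (fun n : Nat => (n : Int)) ?_
  apply List.countP_congr
  intro ia _
  simp [Function.comp, Prod.ext_iff]

-- ===== VERDICT (by name: the statement is the Claim_ definition above) =====
theorem solution_spec : Claim_equal_solution := by
  intro answers _
  unfold Spec_solution solution solution_alt
  simp only [List.map_cons, List.map_nil, foldl_triple_split]
  simp only [pvScore_eq answers [1,2,3,4,5] (by norm_num) (by norm_num),
    pvScore_eq answers [2,1,2,3,2,4,2,5] (by norm_num) (by norm_num),
    pvScore_eq answers [3,3,1,1,2,2,4,4,5,5] (by norm_num) (by norm_num)]
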